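-- pv_equiv track=rewrite | github.com/TomOfHelatrobus/klusterbox | kbspeedsheets.py | dlsn_baseready
-- ===== SOURCE A (Python) =====
-- def dlsn_baseready(array):
--     """ format dynamic list status notation into database ready """
--     new = []
--     for ls in array:  # for each list status
--         if ls in ("nl", "n"):
--             new.append("nl")
--         if ls in ("wal", "w"):
--             new.append("wal")
--         if ls in ("otdl", "odl", "o"):
--             new.append("otdl")
--         if ls in ("aux", "a", "cca", "c"):
--             new.append("aux")
--         if ls in ("ptf", "p"):
--             new.append("ptf")
--     return new
-- ===== SOURCE B (Python) =====
-- # Valid abbreviations; the canonical name is fully determined by a token's first letter.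
-- _VALID = frozenset(('nl', 'n', 'wal', 'w', 'otdl', 'odl', 'o',
--                     'aux', 'a', 'cca', 'c', 'ptf', 'p'))
-- _CANON_BY_INITIAL = {'n': 'nl', 'w': 'wal', 'o': 'otdl',
--                      'a': 'aux', 'c': 'aux', 'p': 'ptf'}
--
--
-- def dlsn_baseready(array):
--     """ format dynamic list status notation into database ready """
--     valid = [ls for ls in array if ls in _VALID]          # pass 1: drop unknown tokens
--     return [_CANON_BY_INITIAL[ls[0]] for ls in valid]     # pass 2: canonical from first letter
-- ===== Notes on version B (the rewrite author's own statement) =====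
-- stated objective: alternative
-- what changed: Replaces the single accumulator loop with five per-category membership branches by a staged two-pass design: one filter against a single validity set, then a map that derives the canonical name from the token's first letter instead of any full-word canonical branching.
import Mathlib
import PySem

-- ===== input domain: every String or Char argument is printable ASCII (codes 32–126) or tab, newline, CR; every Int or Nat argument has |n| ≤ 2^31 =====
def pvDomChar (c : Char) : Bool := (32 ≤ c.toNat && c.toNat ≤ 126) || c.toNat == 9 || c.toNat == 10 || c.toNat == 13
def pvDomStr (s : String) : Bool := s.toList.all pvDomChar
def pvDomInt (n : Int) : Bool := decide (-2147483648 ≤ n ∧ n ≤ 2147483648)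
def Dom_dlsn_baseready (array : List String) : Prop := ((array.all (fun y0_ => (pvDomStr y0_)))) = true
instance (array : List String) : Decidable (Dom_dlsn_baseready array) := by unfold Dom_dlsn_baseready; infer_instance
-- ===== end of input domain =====

-- B replaces A's one loop with five per-category branches by two staged passes: a filter
-- against a single validity set, then a map deriving the canonical name from the first letter.

-- ===== PORT A =====
def dlsn_baseready (array : List String) : List String :=
  array.foldl (fun new ls =>
    let new := if ls = "nl" ∨ ls = "n" then new ++ ["nl"] else new
    let new := if ls = "wal" ∨ ls = "w" then new ++ ["wal"] else new
    let new := if ls = "otdl" ∨ ls = "odl" ∨ ls = "o" then new ++ ["otdl"] else new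
    let new := if ls = "aux" ∨ ls = "a" ∨ ls = "cca" ∨ ls = "c" then new ++ ["aux"] else new
    let new := if ls = "ptf" ∨ ls = "p" then new ++ ["ptf"] else new
    new) []

-- ===== PORT B =====
def validLS : PySem.Set String :=
  PySem.Set.ofList ["nl", "n", "wal", "w", "otdl", "odl", "o",
                    "aux", "a", "cca", "c", "ptf", "p"]

def canonByInitial : PySem.Dict Char String :=
  PySem.Dict.ofList [('n', "nl"), ('w', "wal"), ('o', "otdl"),
                     ('a', "aux"), ('c', "aux"), ('p', "ptf")]

def dlsn_baseready_alt (array : List String) : List String :=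
  -- pass 1: drop unknown tokens; pass 2: canonical name from the first letter.
  -- For valid tokens ls[0] exists and its initial is a key, so the getD defaults never fire.
  let valid := array.filter (fun ls => PySem.Set.contains validLS ls)
  valid.map (fun ls => (canonByInitial.get? ((PySem.Str.pyGet? ls 0).getD ' ')).getD "")

-- ===== PRECONDITION & SPEC =====
def Spec_dlsn_baseready (array : List String) (out : List String) : Prop := out = dlsn_baseready_alt array
instance (array : List String) (out : List String) : Decidable (Spec_dlsn_baseready array out) := by unfold Spec_dlsn_baseready; infer_instance

-- ===== CLAIM =====
def Claim_equal_dlsn_baseready : Prop := ∀ (array : List String), Dom_dlsn_baseready array → Spec_dlsn_baseready array (dlsn_baseready array)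

-- ===== LEMMAS AND PROOFS =====

-- B's per-element contribution, as one function
def bStep (ls : String) : List String :=
  if PySem.Set.contains validLS ls
  then [(canonByInitial.get? ((PySem.Str.pyGet? ls 0).getD ' ')).getD ""] else []

-- filter-then-map (B's two passes) as a single flatMap, for the induction against A's fold
lemma filter_map_eq (p : String → Bool) (f : String → String) (l : List String) :
    (l.filter p).map f = l.flatMap (fun x => if p x then [f x] else []) := by
  induction l with
  | nil => rfl
  | cons hd tl ih =>
    simp only [List.filter_cons, List.flatMap_cons]
    cases h : p hd <;> simp [h, ih]

lemma alt_eq_flatMap (array : List String) :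
    dlsn_baseready_alt array = array.flatMap bStep := by
  unfold dlsn_baseready_alt bStep
  exact filter_map_eq _ _ array

-- A's fold step equals "append B's contribution for this element"
lemma step_eq (new : List String) (ls : String) :
    (let n1 := if ls = "nl" ∨ ls = "n" then new ++ ["nl"] else new
     let n2 := if ls = "wal" ∨ ls = "w" then n1 ++ ["wal"] else n1
     let n3 := if ls = "otdl" ∨ ls = "odl" ∨ ls = "o" then n2 ++ ["otdl"] else n2
     let n4 := if ls = "aux" ∨ ls = "a" ∨ ls = "cca" ∨ ls = "c" then n3 ++ ["aux"] else n3
     if ls = "ptf" ∨ ls = "p" then n4 ++ ["ptf"] else n4)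
    = new ++ bStep ls := by
  by_cases h1 : ls = "nl"
  · subst h1; have hv : bStep "nl" = ["nl"] := by decide
    simp [hv]
  by_cases h2 : ls = "n"
  · subst h2; have hv : bStep "n" = ["nl"] := by decide
    simp [hv]
  by_cases h3 : ls = "wal"
  · subst h3; have hv : bStep "wal" = ["wal"] := by decide
    simp [hv]
  by_cases h4 : ls = "w"
  · subst h4; have hv : bStep "w" = ["wal"] := by decide
    simp [hv]
  by_cases h5 : ls = "otdl"
  · subst h5; have hv : bStep "otdl" = ["otdl"] := by decide
    simp [hv]
  by_cases h6 : ls = "odl"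
  · subst h6; have hv : bStep "odl" = ["otdl"] := by decide
    simp [hv]
  by_cases h7 : ls = "o"
  · subst h7; have hv : bStep "o" = ["otdl"] := by decide
    simp [hv]
  by_cases h8 : ls = "aux"
  · subst h8; have hv : bStep "aux" = ["aux"] := by decide
    simp [hv]
  by_cases h9 : ls = "a"
  · subst h9; have hv : bStep "a" = ["aux"] := by decide
    simp [hv]
  by_cases h10 : ls = "cca"
  · subst h10; have hv : bStep "cca" = ["aux"] := by decide
    simp [hv]
  by_cases h11 : ls = "c"
  · subst h11; have hv : bStep "c" = ["aux"] := by decide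
    simp [hv]
  by_cases h12 : ls = "ptf"
  · subst h12; have hv : bStep "ptf" = ["ptf"] := by decide
    simp [hv]
  by_cases h13 : ls = "p"
  · subst h13; have hv : bStep "p" = ["ptf"] := by decide
    simp [hv]
  have hval : validLS = ["nl", "n", "wal", "w", "otdl", "odl", "o",
                         "aux", "a", "cca", "c", "ptf", "p"] := by decide
  have hmem : ls ∉ validLS := by
    rw [hval]
    simp [h1, h2, h3, h4, h5, h6, h7, h8, h9, h10, h11, h12, h13]
  simp [bStep, PySem.Set.contains, hmem, h1, h2, h3, h4, h5, h6, h7, h8, h9, h10, h11, h12, h13]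

lemma fold_eq (array : List String) (acc : List String) :
    array.foldl (fun new ls =>
      let new := if ls = "nl" ∨ ls = "n" then new ++ ["nl"] else new
      let new := if ls = "wal" ∨ ls = "w" then new ++ ["wal"] else new
      let new := if ls = "otdl" ∨ ls = "odl" ∨ ls = "o" then new ++ ["otdl"] else new
      let new := if ls = "aux" ∨ ls = "a" ∨ ls = "cca" ∨ ls = "c" then new ++ ["aux"] else new
      let new := if ls = "ptf" ∨ ls = "p" then new ++ ["ptf"] else new
      new) acc
    = acc ++ array.flatMap bStep := by
  induction array generalizing acc with
  | nil => simp
  | cons hd tl ih =>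
    simp only [List.foldl_cons, List.flatMap_cons]
    rw [ih, step_eq, List.append_assoc]

-- ===== VERDICT =====
theorem dlsn_baseready_spec : Claim_equal_dlsn_baseready := by
  intro array _
  unfold Spec_dlsn_baseready dlsn_baseready
  rw [fold_eq, alt_eq_flatMap]
  simp
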